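-- pv_equiv track=rewrite | github.com/splenduus/advent-of-code-2021 | 1dec/1decSecondHalf.py | checkDepth
-- ===== SOURCE A (Python) =====
-- def checkDepth(depths):
--     counter = 0
--     add1 = 0
--     add2 = 0
--     for i in range(0,len(depths)-1):
--         try:
--             add1 = depths[i] + depths[i+1] + depths[i+2]
--             add2 = depths[i+1] + depths[i+2] + depths [i+3]
--         except IndexError:
--             return counter
--         if(add1 < add2):
--             counter +=1
--     return counter
-- ===== SOURCE B (Python) =====
-- def checkDepth(depths):
--     # Adjacent triple sums share two terms, so
--     # d[i]+d[i+1]+d[i+2] < d[i+1]+d[i+2]+d[i+3]  iff  d[i] < d[i+3]: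
--     # compare each element with the one three positions later, no sums needed.
--     return sum(1 for a, d in zip(depths, depths[3:]) if a < d)
-- ===== Notes on version B (the rewrite author's own statement) =====
-- stated objective: faster
-- what changed: Replaces summing consecutive 3-element windows and comparing adjacent sums by the algebraic identity that adjacent windows share two terms, so it only compares each element with the one three positions later (zip with a 3-shifted slice); no window sums or per-step index arithmetic at all.
import Mathlib
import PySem

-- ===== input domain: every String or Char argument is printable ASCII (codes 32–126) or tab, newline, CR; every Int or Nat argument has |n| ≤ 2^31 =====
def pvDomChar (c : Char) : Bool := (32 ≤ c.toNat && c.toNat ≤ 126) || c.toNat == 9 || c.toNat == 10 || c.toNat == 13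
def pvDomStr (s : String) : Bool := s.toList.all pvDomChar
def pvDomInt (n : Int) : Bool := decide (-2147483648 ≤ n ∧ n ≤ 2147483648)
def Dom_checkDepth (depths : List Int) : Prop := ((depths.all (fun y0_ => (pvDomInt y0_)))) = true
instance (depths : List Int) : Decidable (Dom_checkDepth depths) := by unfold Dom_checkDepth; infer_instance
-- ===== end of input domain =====

-- B drops the window sums entirely: since adjacent triple windows share two terms,
-- it just compares each element with the one three positions later (same cost, different algorithm).


-- ===== PORT A =====
-- A's for-loop with its try/except early return, as recursion on the number of
-- remaining iterations (rem = len(depths)-1 - i); pyGet? = none models IndexError,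
-- on which the loop returns counter, exactly like A's except branch
def checkDepthAux (depths : List Int) (counter : Int) (i : Nat) : Nat → Int
  | 0 => counter
  | r + 1 =>
    match PySem.List.pyGet? depths (i : Int), PySem.List.pyGet? depths ((i : Int) + 1),
          PySem.List.pyGet? depths ((i : Int) + 2), PySem.List.pyGet? depths ((i : Int) + 3) with
    | some a, some b, some c, some d =>
        let add1 := a + b + c
        let add2 := b + c + d
        checkDepthAux depths (if add1 < add2 then counter + 1 else counter) (i + 1) r
    | _, _, _, _ => counter

def checkDepth (depths : List Int) : Int :=
  checkDepthAux depths 0 0 (depths.length - 1)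

-- ===== PORT B =====
-- depths[3:] with a nonnegative start is exactly List.drop 3
def checkDepth_alt (depths : List Int) : Int :=
  (List.zip depths (depths.drop 3)).foldl (fun acc p => if p.1 < p.2 then acc + 1 else acc) 0

-- ===== PRECONDITION & SPEC =====
def Spec_checkDepth (depths : List Int) (out : Int) : Prop := out = checkDepth_alt depths
instance (depths : List Int) (out : Int) : Decidable (Spec_checkDepth depths out) := by unfold Spec_checkDepth; infer_instance

-- ===== CLAIM (what is proved, stated in full; the proofs are below) =====
def Claim_equal_checkDepth : Prop := ∀ (depths : List Int), Dom_checkDepth depths → Spec_checkDepth depths (checkDepth depths)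

-- ===== LEMMAS AND PROOFS =====

-- common reference count: one indicator per 4-element window, recursing on the tail
def pvCnt : List Int → Int
  | a :: b :: c :: d :: t => (if a + b + c < b + c + d then 1 else 0) + pvCnt (b :: c :: d :: t)
  | _ => 0

theorem checkDepthAux_step (L : List Int) (cnt : Int) (i r : Nat) (va vb vc vd : Int)
    (h0 : PySem.List.pyGet? L (i : Int) = some va)
    (h1 : PySem.List.pyGet? L ((i : Int) + 1) = some vb)
    (h2 : PySem.List.pyGet? L ((i : Int) + 2) = some vc)
    (h3 : PySem.List.pyGet? L ((i : Int) + 3) = some vd) :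
    checkDepthAux L cnt i (r + 1) =
      checkDepthAux L (if va + vb + vc < vb + vc + vd then cnt + 1 else cnt) (i + 1) r := by
  simp only [checkDepthAux, h0, h1, h2, h3]

theorem checkDepthAux_shift (t : List Int) (x : Int) :
    ∀ (r i : Nat) (c : Int), checkDepthAux (x :: t) c (i + 1) r = checkDepthAux t c i r := by
  intro r
  induction r with
  | zero => intro i c; rfl
  | succ r ih =>
    intro i c
    have g : ∀ k : Nat, PySem.List.pyGet? (x :: t) (((i + 1 : Nat) : Int) + (k : Int)) =
        PySem.List.pyGet? t ((i : Int) + (k : Int)) := by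
      intro k
      have : ((i + 1 : Nat) : Int) + (k : Int) = ((i + k : Nat) : Int) + 1 := by push_cast; ring
      rw [this, PySem.List.pyGet?_cons_succ]
      push_cast; ring_nf
    have g0 := g 0; have g1 := g 1; have g2 := g 2; have g3 := g 3
    simp only [Nat.cast_ofNat, Nat.cast_one, Nat.cast_zero, add_zero] at g0 g1 g2 g3
    simp only [checkDepthAux, g0, g1, g2, g3]
    cases h1 : PySem.List.pyGet? t (i : Int) <;>
      cases h2 : PySem.List.pyGet? t ((i : Int) + 1) <;>
      cases h3 : PySem.List.pyGet? t ((i : Int) + 2) <;>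
      cases h4 : PySem.List.pyGet? t ((i : Int) + 3) <;>
      simp [ih]

theorem checkDepthAux_acc (depths : List Int) :
    ∀ (r i : Nat) (c : Int), checkDepthAux depths c i r = c + checkDepthAux depths 0 i r := by
  intro r
  induction r with
  | zero => intro i c; simp [checkDepthAux]
  | succ r ih =>
    intro i c
    simp only [checkDepthAux]
    cases h1 : PySem.List.pyGet? depths (i : Int) <;>
      cases h2 : PySem.List.pyGet? depths ((i : Int) + 1) <;>
      cases h3 : PySem.List.pyGet? depths ((i : Int) + 2) <;>
      cases h4 : PySem.List.pyGet? depths ((i : Int) + 3)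
    all_goals first
      | (dsimp only; (conv_lhs => rw [ih]); (conv_rhs => rw [ih]); split_ifs <;> ring)
      | simp

theorem checkDepth_eq_cnt : ∀ L : List Int, checkDepth L = pvCnt L := by
  intro L
  induction L using pvCnt.induct with
  | case1 a b c d t ih =>
    show checkDepthAux _ 0 0 ((a :: b :: c :: d :: t).length - 1) = _
    have hlen : (a :: b :: c :: d :: t).length - 1 = (t.length + 2) + 1 := by simp
    rw [hlen]
    rw [checkDepthAux_step _ _ _ _ a b c d
      (by rw [show ((0 : Nat) : Int) = ((0 : Nat) : Int) from rfl,
              PySem.List.pyGet?_ofNat _ _ (by simp)]; simp)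
      (by rw [show ((0 : Nat) : Int) + 1 = ((1 : Nat) : Int) from by norm_num,
              PySem.List.pyGet?_ofNat _ _ (by simp)]; simp)
      (by rw [show ((0 : Nat) : Int) + 2 = ((2 : Nat) : Int) from by norm_num,
              PySem.List.pyGet?_ofNat _ _ (by simp)]; simp)
      (by rw [show ((0 : Nat) : Int) + 3 = ((3 : Nat) : Int) from by norm_num,
              PySem.List.pyGet?_ofNat _ _ (by simp)]; simp)]
    rw [show (0 + 1 : Nat) = 0 + 1 from rfl, checkDepthAux_shift, checkDepthAux_acc]
    have h2 : checkDepthAux (b :: c :: d :: t) 0 0 (t.length + 2) = pvCnt (b :: c :: d :: t) := by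
      rw [← ih]; rfl
    rw [h2, pvCnt]
    split_ifs <;> ring
  | case2 L h =>
    match L, h with
    | [], _ => rfl
    | [a], _ => rfl
    | [a, b], _ => simp [checkDepth, checkDepthAux, pvCnt, PySem.List.pyGet?, PySem.List.pyIdx?]
    | [a, b, c], _ => simp [checkDepth, checkDepthAux, pvCnt, PySem.List.pyGet?, PySem.List.pyIdx?]
    | a :: b :: c :: d :: t, h => exact absurd rfl (h a b c d t)

theorem foldl_cnt_acc (l : List (Int × Int)) :
    ∀ c : Int, l.foldl (fun acc p => if p.1 < p.2 then acc + 1 else acc) c =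
      c + l.foldl (fun acc p => if p.1 < p.2 then acc + 1 else acc) 0 := by
  induction l with
  | nil => intro c; simp
  | cons p l ih =>
    intro c
    simp only [List.foldl_cons]
    conv_lhs => rw [ih]
    conv_rhs => rw [ih]
    split_ifs <;> ring

theorem alt_eq_cnt : ∀ L : List Int, checkDepth_alt L = pvCnt L := by
  intro L
  induction L using pvCnt.induct with
  | case1 a b c d t ih =>
    rw [pvCnt, ← ih]
    simp only [checkDepth_alt, List.drop, List.zip_cons_cons, List.foldl_cons]
    rw [foldl_cnt_acc]
    have hiff : (a + b + c < b + c + d) ↔ (a < d) := by omega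
    simp only [hiff]
    split_ifs <;> ring
  | case2 L h =>
    match L, h with
    | [], _ => rfl
    | [a], _ => rfl
    | [a, b], _ => rfl
    | [a, b, c], _ => rfl
    | a :: b :: c :: d :: t, h => exact absurd rfl (h a b c d t)

-- ===== VERDICT (by name: the statement is the Claim_ definition above) =====
theorem checkDepth_spec : Claim_equal_checkDepth := by
  intro depths _
  show checkDepth depths = checkDepth_alt depths
  rw [checkDepth_eq_cnt, alt_eq_cnt]
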